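-- pv_equiv track=rewrite | github.com/miliar/Code_Jam_Webscraper | solutions_python/solutions_year14_round0_nr4/463.py | deceitfulwar
-- ===== SOURCE A (Python) =====
-- def deceitfulwar(N,naomi,ken):
--
--     naomi.sort()
--     ken.sort()
--
--     compare = [ naomi[i]>ken[i] for i in range(len(naomi)) ]
--     while False in compare:
--         # naomi chooses the smallest element
--         nchoice = naomi.pop(0)
--         ken.pop()
--         compare = [ naomi[i]>ken[i] for i in range(len(naomi)) ]
--
--     nwins = len(naomi)
--
--     return nwins
-- ===== SOURCE B (Python) =====
-- def deceitfulwar(N, naomi, ken):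
--     # Single two-pointer pass over the two sorted lists: j counts Naomi cards
--     # that can beat a distinct (smallest available) Ken card.
--     # Note: unlike A, this does not mutate naomi/ken in place; return value only.
--     a = sorted(naomi)
--     k = sorted(ken)
--     j = 0
--     for x in a:
--         if x > k[j]:
--             j += 1
--     return j
-- ===== Notes on version B (the rewrite author's own statement) =====
-- stated objective: faster
-- what changed: A repeatedly rebuilds the full elementwise comparison list and pops cards until every remaining Naomi card beats its Ken counterpart (quadratic); B makes one two-pointer greedy pass over the two sorted lists counting Naomi cards that beat the smallest still-unbeaten Ken card.
import Mathlib
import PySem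

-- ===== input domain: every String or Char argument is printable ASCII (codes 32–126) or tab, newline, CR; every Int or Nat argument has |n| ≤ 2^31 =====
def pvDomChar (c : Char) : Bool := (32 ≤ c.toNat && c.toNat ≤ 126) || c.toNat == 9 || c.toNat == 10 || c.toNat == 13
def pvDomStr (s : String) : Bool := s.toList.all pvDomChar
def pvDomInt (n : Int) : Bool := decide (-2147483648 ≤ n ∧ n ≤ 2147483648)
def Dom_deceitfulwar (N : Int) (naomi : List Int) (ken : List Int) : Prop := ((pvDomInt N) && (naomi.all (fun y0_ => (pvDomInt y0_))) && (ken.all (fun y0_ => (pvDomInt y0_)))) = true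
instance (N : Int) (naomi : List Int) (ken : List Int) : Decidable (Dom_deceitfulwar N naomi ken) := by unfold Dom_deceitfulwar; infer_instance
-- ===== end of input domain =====

-- B replaces A's quadratic pop-and-recompare loop by one two-pointer greedy pass
-- over the two sorted lists (faster); return-value equivalence only: A sorts/pops
-- its argument lists in place, B does not mutate them.

-- ===== PORT A =====
-- compare = [ naomi[i] > ken[i] for i in range(len(naomi)) ]
-- (getD is total; inputs where Python's ken[i] raises IndexError are excluded by Pre_)
def pvCompare (naomi ken : List Int) : List Bool :=
  (List.range naomi.length).map (fun i => decide (naomi.getD i 0 > ken.getD i 0))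

-- while False in compare: naomi.pop(0); ken.pop(); recompute compare — then len(naomi)
def pvWarLoop : List Int → List Int → Int
  | [], _ => (0 : Int)
  | x :: rest, k =>
      if false ∈ pvCompare (x :: rest) k then pvWarLoop rest k.dropLast
      else ((x :: rest).length : Int)

def deceitfulwar (N : Int) (naomi : List Int) (ken : List Int) : Int :=
  pvWarLoop (PySem.List.sorted naomi (fun v => v) false)
            (PySem.List.sorted ken (fun v => v) false)

-- ===== PORT B =====
-- j = 0; for x in a: if x > k[j]: j += 1; return j
def pvGreedy (k : List Int) : List Int → Int → Int
  | [], j => j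
  | x :: rest, j =>
      pvGreedy k rest (if x > (PySem.List.pyGet? k j).getD 0 then j + 1 else j)

def deceitfulwar_alt (N : Int) (naomi : List Int) (ken : List Int) : Int :=
  pvGreedy (PySem.List.sorted ken (fun v => v) false)
           (PySem.List.sorted naomi (fun v => v) false) 0

-- ===== PRECONDITION & SPEC =====
-- A raises IndexError (ken[i] while building compare) exactly when naomi is longer than ken.
def Pre_deceitfulwar (N : Int) (naomi : List Int) (ken : List Int) : Prop :=
  naomi.length ≤ ken.length
instance (N : Int) (naomi : List Int) (ken : List Int) : Decidable (Pre_deceitfulwar N naomi ken) := by unfold Pre_deceitfulwar; infer_instance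

def pvWitness_deceitfulwar : Int × List Int × List Int := (3, [5, 1, 9], [6, 2, 7])

def Spec_deceitfulwar (N : Int) (naomi : List Int) (ken : List Int) (out : Int) : Prop := out = deceitfulwar_alt N naomi ken
instance (N : Int) (naomi : List Int) (ken : List Int) (out : Int) : Decidable (Spec_deceitfulwar N naomi ken out) := by unfold Spec_deceitfulwar; infer_instance

-- ===== CLAIM (what is proved, stated in full; the proofs are below) =====
def Claim_equal_deceitfulwar : Prop := ∀ (N : Int) (naomi : List Int) (ken : List Int), Dom_deceitfulwar N naomi ken → Pre_deceitfulwar N naomi ken → Spec_deceitfulwar N naomi ken (deceitfulwar N naomi ken)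

-- ===== LEMMAS AND PROOFS =====

-- "every remaining Naomi card beats its Ken counterpart"
def pvBeat (a k : List Int) : Bool :=
  (List.range a.length).all (fun i => a.getD i 0 > k.getD i 0)

-- number of cards Naomi has to sacrifice: least s with pvBeat (a.drop s) k
def pvSMin : List Int → List Int → Nat
  | [], _ => 0
  | x :: rest, k => if pvBeat (x :: rest) k then 0 else pvSMin rest k + 1

theorem pvBeat_iff (a k : List Int) :
    pvBeat a k = true ↔ ∀ i < a.length, a.getD i 0 > k.getD i 0 := by
  simp [pvBeat, List.all_eq_true, List.mem_range]

theorem false_mem_pvCompare (a k : List Int) :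
    false ∈ pvCompare a k ↔ ¬ pvBeat a k = true := by
  simp [pvCompare, pvBeat, List.all_eq_true, List.mem_range]

theorem pvGetD_drop (l : List Int) (s i : Nat) :
    (l.drop s).getD i 0 = l.getD (s + i) 0 := by
  simp [List.getD_eq_getElem?_getD, List.getElem?_drop]

theorem pvBeat_congr (a k k' : List Int)
    (h : ∀ i < a.length, k.getD i 0 = k'.getD i 0) : pvBeat a k = pvBeat a k' := by
  rw [Bool.eq_iff_iff, pvBeat_iff, pvBeat_iff]
  constructor <;> intro H i hi
  · rw [← h i hi]; exact H i hi
  · rw [h i hi]; exact H i hi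

theorem pvSMin_congr (a k k' : List Int)
    (h : ∀ i < a.length, k.getD i 0 = k'.getD i 0) : pvSMin a k = pvSMin a k' := by
  induction a with
  | nil => rfl
  | cons x rest ih =>
    have h' : ∀ i < rest.length, k.getD i 0 = k'.getD i 0 := by
      intro i hi; exact h i (by simp; omega)
    simp only [pvSMin]
    rw [pvBeat_congr _ _ _ h]
    split
    · rfl
    · rw [ih h']

theorem pvWarLoop_eq (a k : List Int) (hlen : a.length ≤ k.length) :
    pvWarLoop a k = (a.length : Int) - (pvSMin a k : Int) := by
  induction a generalizing k with
  | nil => simp [pvWarLoop, pvSMin]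
  | cons x rest ih =>
    simp only [pvWarLoop]
    by_cases hb : pvBeat (x :: rest) k = true
    · rw [if_neg (by rw [false_mem_pvCompare]; simp [hb])]
      simp [pvSMin, hb]
    · rw [if_pos ((false_mem_pvCompare _ _).mpr hb)]
      simp only [List.length_cons] at hlen
      have hlen' : rest.length ≤ k.dropLast.length := by
        simp [List.length_dropLast]; omega
      rw [ih _ hlen']
      have hag : ∀ i < rest.length, k.dropLast.getD i 0 = k.getD i 0 := by
        intro i hi
        rw [List.getD_eq_getElem _ _ (by simp [List.length_dropLast]; omega),
          List.getD_eq_getElem _ _ (by omega), List.getElem_dropLast]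
      rw [pvSMin_congr rest _ _ hag]
      simp only [pvSMin, if_neg hb, List.length_cons]
      push_cast
      ring

theorem pvGreedy_shift (k : List Int) (b : List Int) (j : Int) (hj : 0 ≤ j) :
    pvGreedy k b (j + 1) = 1 + pvGreedy k.tail b j := by
  induction b generalizing j with
  | nil => simp [pvGreedy]; omega
  | cons x rest ih =>
    have hget : PySem.List.pyGet? k (j + 1) = PySem.List.pyGet? k.tail j := by
      rw [PySem.List.pyGet?_of_nonneg k (show (0:Int) ≤ j + 1 by omega),
        PySem.List.pyGet?_of_nonneg k.tail hj, List.getElem?_tail]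
      congr 1
      omega
    simp only [pvGreedy, hget]
    by_cases hc : x > (PySem.List.pyGet? k.tail j).getD 0
    · rw [if_pos hc, if_pos hc]; exact ih (j + 1) (by omega)
    · rw [if_neg hc, if_neg hc]; exact ih j hj

theorem pvSMin_spec (a k : List Int) :
    pvBeat (a.drop (pvSMin a k)) k = true ∧
      ∀ s < pvSMin a k, pvBeat (a.drop s) k = false := by
  induction a with
  | nil => exact ⟨by simp [pvSMin, pvBeat], fun s hs => absurd hs (by simp [pvSMin])⟩
  | cons x rest ih =>
    simp only [pvSMin]
    by_cases hb : pvBeat (x :: rest) k = true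
    · rw [if_pos hb]
      exact ⟨by simpa using hb, fun s hs => absurd hs (Nat.not_lt_zero s)⟩
    · rw [if_neg hb]
      obtain ⟨h1, h2⟩ := ih
      refine ⟨by simpa [List.drop_succ_cons] using h1, ?_⟩
      intro s hs
      cases s with
      | zero => simpa [Bool.not_eq_true] using hb
      | succ s' => rw [List.drop_succ_cons]; exact h2 s' (by omega)

theorem pvBeat_drop_tail (x y : Int) (rest kt : List Int)
    (hsort : (x :: rest).Pairwise (· ≤ ·)) (hxy : y < x) (s : Nat) :
    (pvBeat ((x :: rest).drop s) (y :: kt) = true ↔ pvBeat (rest.drop s) kt = true) := by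
  have hx_le : ∀ t, t < (x :: rest).length → x ≤ (x :: rest).getD t 0 := by
    intro t ht
    cases t with
    | zero => simp
    | succ t' =>
      simp only [List.length_cons, Nat.succ_lt_succ_iff] at ht
      rw [List.getD_cons_succ, List.getD_eq_getElem _ _ ht]
      exact (List.pairwise_cons.mp hsort).1 _ (List.getElem_mem ht)
  rw [pvBeat_iff, pvBeat_iff]
  simp only [List.length_drop, List.length_cons]
  constructor
  · intro H i hi
    have hb : i + 1 < rest.length + 1 - s := by omega
    have := H (i + 1) hb
    rw [pvGetD_drop, List.getD_cons_succ] at this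
    rw [pvGetD_drop]
    have hidx : s + (i + 1) = (s + i) + 1 := by omega
    rw [hidx, List.getD_cons_succ] at this
    exact this
  · intro H i hi
    rw [pvGetD_drop]
    cases i with
    | zero =>
      have hs : s < (x :: rest).length := by simp; omega
      calc (y :: kt).getD 0 0 = y := by simp
        _ < x := hxy
        _ ≤ (x :: rest).getD (s + 0) 0 := by simpa using hx_le s hs
    | succ i' =>
      have := H i' (by omega)
      rw [pvGetD_drop] at this
      have hidx : s + (i' + 1) = (s + i') + 1 := by omega
      rw [hidx, List.getD_cons_succ, List.getD_cons_succ]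
      exact this

theorem pvSMin_cons (x y : Int) (rest kt : List Int)
    (hsort : (x :: rest).Pairwise (· ≤ ·)) (hxy : y < x) :
    pvSMin (x :: rest) (y :: kt) = pvSMin rest kt := by
  obtain ⟨p1, p2⟩ := pvSMin_spec (x :: rest) (y :: kt)
  obtain ⟨q1, q2⟩ := pvSMin_spec rest kt
  rcases lt_trichotomy (pvSMin (x :: rest) (y :: kt)) (pvSMin rest kt) with h | h | h
  · have ht := (pvBeat_drop_tail x y rest kt hsort hxy _).mp p1
    have hf := q2 _ h
    simp [hf] at ht
  · exact h
  · have ht := (pvBeat_drop_tail x y rest kt hsort hxy _).mpr q1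
    have hf := p2 _ h
    simp [hf] at ht

theorem pvGreedy_eq (a k : List Int) (ha : a.Pairwise (· ≤ ·)) (hk : k.Pairwise (· ≤ ·))
    (hlen : a.length ≤ k.length) :
    pvGreedy k a 0 = (a.length : Int) - (pvSMin a k : Int) := by
  induction a generalizing k with
  | nil => simp [pvGreedy, pvSMin]
  | cons x rest ih =>
    cases k with
    | nil => simp at hlen
    | cons y kt =>
      have ha' : rest.Pairwise (· ≤ ·) := (List.pairwise_cons.mp ha).2
      have hk' : kt.Pairwise (· ≤ ·) := (List.pairwise_cons.mp hk).2
      simp only [pvGreedy, PySem.List.pyGet?_zero_cons, Option.getD_some]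
      by_cases hxy : x > y
      · rw [if_pos hxy]
        have hshift := pvGreedy_shift (y :: kt) rest 0 (le_refl 0)
        simp only [List.tail_cons] at hshift
        rw [hshift, ih kt ha' hk' (by simp at hlen ⊢; omega),
          pvSMin_cons x y rest kt ha hxy]
        simp only [List.length_cons]
        push_cast
        ring
      · rw [if_neg hxy]
        rw [ih (y :: kt) ha' hk (by simp at hlen ⊢; omega)]
        have hsm : pvSMin (x :: rest) (y :: kt) = pvSMin rest (y :: kt) + 1 := by
          simp only [pvSMin]
          rw [if_neg ?hc]
          case hc =>
            intro hb
            have := (pvBeat_iff _ _).mp hb 0 (by simp)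
            simp at this
            omega
        rw [hsm]
        simp only [List.length_cons]
        push_cast
        ring

-- ===== VERDICT (by name: the statement is the Claim_ definition above) =====
theorem deceitfulwar_spec : Claim_equal_deceitfulwar := by
  intro N naomi ken _hdom hpre
  unfold Spec_deceitfulwar deceitfulwar deceitfulwar_alt
  have hl : (PySem.List.sorted naomi (fun v => v) false).length ≤
      (PySem.List.sorted ken (fun v => v) false).length := by
    simpa [PySem.List.length_sorted] using hpre
  rw [pvWarLoop_eq _ _ hl,
    pvGreedy_eq _ _ (PySem.List.sorted_pairwise ..) (PySem.List.sorted_pairwise ..) hl]
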